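-- pv_equiv track=rewrite | github.com/RickyCode/ProgramacionAvanzada | Actividades/AC07/main.py | rut_valido
-- ===== SOURCE A (Python) =====
-- def rut_valido(rut): #Funcion de apoyo
--     if rut.count('-') > 1:
--         return False
--     for c in rut:
--         if c == '-':
--             pass
--         elif c.isnumeric():
--             pass
--         else: return False
--     return True
-- ===== SOURCE B (Python) =====
-- def rut_valido(rut):
--     parts = rut.split('-')
--     if len(parts) > 2:
--         return False
--     return all(p == '' or p.isdigit() for p in parts)
-- ===== Notes on version B (the rewrite author's own statement) =====
-- stated objective: simpler
-- what changed: Replaces the count-then-character-scan with a single split on '-': reject more than two parts, then require every part to be empty or all digits.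
import Mathlib
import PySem

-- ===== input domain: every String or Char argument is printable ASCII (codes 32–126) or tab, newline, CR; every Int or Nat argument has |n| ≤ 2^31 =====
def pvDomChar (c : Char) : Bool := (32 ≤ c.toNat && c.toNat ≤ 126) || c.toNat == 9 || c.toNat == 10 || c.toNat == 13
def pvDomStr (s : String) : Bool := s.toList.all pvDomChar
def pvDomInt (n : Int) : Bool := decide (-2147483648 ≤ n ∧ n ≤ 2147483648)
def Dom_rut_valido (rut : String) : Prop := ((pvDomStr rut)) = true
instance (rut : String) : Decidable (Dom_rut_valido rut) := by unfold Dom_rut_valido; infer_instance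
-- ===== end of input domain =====

-- B replaces A's dash-count check plus per-character scan by one split on '-'
-- followed by a per-part emptiness/digit test (objective: simpler decomposition).
-- On the ASCII domain, Python's str.isnumeric coincides with Chars.isdigit (exact there).

-- ===== PORT A =====
-- the 'for c in rut' loop with its early 'return False'
def rutLoopA : List Char → Bool
  | [] => true
  | c :: rest =>
      if c = '-' then rutLoopA rest
      else if PySem.Chars.isdigit c then rutLoopA rest
      else false

def rut_valido (rut : String) : Bool :=
  if PySem.Str.count rut "-" > 1 then false
  else rutLoopA rut.toList

-- ===== PORT B =====
def rut_valido_alt (rut : String) : Bool :=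
  let parts := PySem.Chars.splitOn rut.toList ['-']
  if parts.length > 2 then false
  else parts.all (fun p => p.isEmpty || PySem.Chars.strIsdigit p)

-- ===== PRECONDITION & SPEC =====
def Spec_rut_valido (rut : String) (out : Bool) : Prop := out = rut_valido_alt rut
instance (rut : String) (out : Bool) : Decidable (Spec_rut_valido rut out) := by unfold Spec_rut_valido; infer_instance

-- ===== CLAIM (what is proved, stated in full; the proofs are below) =====
def Claim_equal_rut_valido : Prop := ∀ (rut : String), Dom_rut_valido rut → Spec_rut_valido rut (rut_valido rut)

-- ===== LEMMAS AND PROOFS =====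

-- the natural structural split of a char list at '-'
def mySplit : List Char → List (List Char)
  | [] => [[]]
  | c :: r => if c = '-' then [] :: mySplit r
              else match mySplit r with
                   | [] => [[c]]
                   | p :: ps => (c :: p) :: ps

theorem mySplit_ne_nil (l : List Char) : mySplit l ≠ [] := by
  cases l with
  | nil => simp [mySplit]
  | cons c r =>
      simp only [mySplit]
      split
      · simp
      · cases h : mySplit r <;> simp

theorem count_go_spec (fuel : Nat) (l : List Char) (acc : Nat)
    (h : l.length ≤ fuel) :
    PySem.Chars.count.go ['-'] fuel l acc = acc + l.count '-' := by
  induction fuel generalizing l acc with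
  | zero =>
      have : l = [] := by cases l <;> simp_all
      subst this; simp [PySem.Chars.count.go]
  | succ fuel ih =>
      cases l with
      | nil => simp [PySem.Chars.count.go]
      | cons c rest =>
          simp only [PySem.Chars.count.go]
          by_cases hc : c = '-'
          · subst hc
            have hp : List.isPrefixOf ['-'] ('-' :: rest) = true := by
              simp [List.isPrefixOf]
            rw [if_pos hp]
            rw [show List.drop (['-'] : List Char).length ('-' :: rest) = rest from rfl]
            rw [ih rest (acc + 1) (by simpa using Nat.le_of_succ_le_succ h)]
            simp
            omega
          · have hp : ¬ List.isPrefixOf ['-'] (c :: rest) = true := by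
              simp [List.isPrefixOf]
              exact fun hh => hc hh.symm
            rw [if_neg hp]
            rw [ih rest acc (by simpa using Nat.le_of_succ_le_succ h)]
            simp [hc]

theorem count_dash (l : List Char) :
    PySem.Chars.count l ['-'] = l.count '-' := by
  simp only [PySem.Chars.count]
  rw [if_neg (by simp)]
  simpa using count_go_spec l.length l 0 (Nat.le_refl _)

-- prepend x onto the head part (mySplit results are never empty)
def consHead (x : List Char) : List (List Char) → List (List Char)
  | [] => [x]
  | p :: ps => (x ++ p) :: ps

theorem consHead_consHead (x y : List Char) (ps : List (List Char)) (h : ps ≠ []) :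
    consHead x (consHead y ps) = consHead (x ++ y) ps := by
  cases ps with
  | nil => exact absurd rfl h
  | cons p ps => simp [consHead]

theorem consHead_nil_of_ne (ps : List (List Char)) (h : ps ≠ []) :
    consHead [] ps = ps := by
  cases ps with
  | nil => exact absurd rfl h
  | cons p ps => simp [consHead]

theorem mySplit_cons_dash (r : List Char) : mySplit ('-' :: r) = [] :: mySplit r := by
  simp [mySplit]

theorem mySplit_cons_ne (c : Char) (r : List Char) (hc : c ≠ '-') :
    mySplit (c :: r) = consHead [c] (mySplit r) := by
  simp only [mySplit, if_neg hc]
  cases h : mySplit r <;> simp [consHead]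

theorem splitOn_go_spec (fuel : Nat) (l cur : List Char) (acc : List (List Char))
    (h : l.length < fuel) :
    PySem.Chars.splitOn.go ['-'] fuel l cur acc
      = acc.reverse ++ consHead cur.reverse (mySplit l) := by
  induction fuel generalizing l cur acc with
  | zero => omega
  | succ fuel ih =>
      cases l with
      | nil =>
          simp [PySem.Chars.splitOn.go, mySplit, consHead]
      | cons c rest =>
          simp only [PySem.Chars.splitOn.go]
          by_cases hc : c = '-'
          · subst hc
            have hp : List.isPrefixOf ['-'] ('-' :: rest) = true := by
              simp [List.isPrefixOf]
            rw [if_pos hp]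
            rw [show List.drop (['-'] : List Char).length ('-' :: rest) = rest from rfl]
            rw [ih rest [] (cur.reverse :: acc) (by simpa using Nat.lt_of_succ_lt_succ h)]
            rw [List.reverse_nil, consHead_nil_of_ne _ (mySplit_ne_nil rest), mySplit_cons_dash]
            cases hms : mySplit rest with
            | nil => exact absurd hms (mySplit_ne_nil rest)
            | cons p ps => simp [consHead]
          · have hp : ¬ List.isPrefixOf ['-'] (c :: rest) = true := by
              simp [List.isPrefixOf]
              exact fun hh => hc hh.symm
            rw [if_neg hp]
            rw [ih rest (c :: cur) acc (by simpa using Nat.lt_of_succ_lt_succ h)]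
            rw [mySplit_cons_ne c rest hc,
                consHead_consHead _ _ _ (mySplit_ne_nil rest)]
            simp [consHead]

theorem splitOn_eq_mySplit (l : List Char) :
    PySem.Chars.splitOn l ['-'] = mySplit l := by
  simp only [PySem.Chars.splitOn]
  rw [splitOn_go_spec (l.length + 1) l [] [] (Nat.lt_succ_self _)]
  simpa using consHead_nil_of_ne _ (mySplit_ne_nil l)

theorem mySplit_length (l : List Char) :
    (mySplit l).length = l.count '-' + 1 := by
  induction l with
  | nil => simp [mySplit]
  | cons c r ih =>
      by_cases hc : c = '-'
      · subst hc; simp [mySplit_cons_dash, ih]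
      · rw [mySplit_cons_ne c r hc]
        cases hms : mySplit r with
        | nil => exact absurd hms (mySplit_ne_nil r)
        | cons p ps =>
            have := ih; rw [hms] at this
            simp [consHead, hc] at *
            omega

theorem mySplit_all_digit (l : List Char) :
    (mySplit l).all (fun p => p.all PySem.Chars.isdigit)
      = l.all (fun c => decide (c = '-') || PySem.Chars.isdigit c) := by
  induction l with
  | nil => simp [mySplit]
  | cons c r ih =>
      by_cases hc : c = '-'
      · subst hc; simp [mySplit_cons_dash, ih]
      · rw [mySplit_cons_ne c r hc]
        cases hms : mySplit r with
        | nil => exact absurd hms (mySplit_ne_nil r)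
        | cons p ps =>
            have := ih; rw [hms] at this
            simp [consHead, hc, List.all_cons] at *
            rw [← this]
            cases PySem.Chars.isdigit c <;> simp

theorem rutLoopA_eq_all (l : List Char) :
    rutLoopA l = l.all (fun c => decide (c = '-') || PySem.Chars.isdigit c) := by
  induction l with
  | nil => simp [rutLoopA]
  | cons c r ih =>
      simp only [rutLoopA, List.all_cons]
      by_cases hc : c = '-'
      · subst hc; simp [ih]
      · simp only [hc, decide_false, Bool.false_or, if_false]
        cases hd : PySem.Chars.isdigit c <;> simp [ih]

theorem part_pred_eq (p : List Char) :
    (p.isEmpty || PySem.Chars.strIsdigit p) = p.all PySem.Chars.isdigit := by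
  cases p with
  | nil => simp [PySem.Chars.strIsdigit]
  | cons c r => simp [PySem.Chars.strIsdigit]

-- ===== VERDICT (by name: the statement is the Claim_ definition above) =====
theorem rut_valido_spec : Claim_equal_rut_valido := by
  intro rut _
  unfold Spec_rut_valido rut_valido rut_valido_alt
  have hall : (PySem.Chars.splitOn rut.toList ['-']).all
        (fun p => p.isEmpty || PySem.Chars.strIsdigit p)
      = rutLoopA rut.toList := by
    rw [show (fun (p : List Char) => p.isEmpty || PySem.Chars.strIsdigit p)
          = (fun p => p.all PySem.Chars.isdigit) from funext part_pred_eq]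
    rw [splitOn_eq_mySplit, mySplit_all_digit, rutLoopA_eq_all]
  have hcount : PySem.Str.count rut "-" = rut.toList.count '-' := by
    simpa [PySem.Str.count] using count_dash rut.toList
  have hlen : (PySem.Chars.splitOn rut.toList ['-']).length
      = rut.toList.count '-' + 1 := by
    rw [splitOn_eq_mySplit, mySplit_length]
  simp only [hall, hcount, hlen]
  split_ifs with h1 h2 h2 <;> first | rfl | omega
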